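-- pv_equiv track=rewrite | github.com/Mdixit/Hackerrank | algorithms/substrn.py | func
-- ===== SOURCE A (Python) =====
-- def func(iput): #correct soln
--     mulpler = 0
--     sumf = 0
--
--     for i in range(len(iput)):
--
--         mulpler = ((mulpler * 10) + 1)
--         mulpler = mulpler % 1000000007
--         sumf = sumf + (iput[(len(iput))-i-1] * mulpler * (len(iput)-i))
--         sumf = sumf % 1000000007
--     return sumf
-- ===== SOURCE B (Python) =====
-- def func(iput):
--     M = 1000000007
--     current = 0
--     result = 0
--     for i, v in enumerate(iput):
--         current = (current * 10 + (i + 1) * v) % M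
--         result = (result + current) % M
--     return result
-- ===== Notes on version B (the rewrite author's own statement) =====
-- stated objective: simpler
-- what changed: Replaces A's backward loop with an explicit repunit multiplier and (len-i) position weight by a forward one-pass DP that keeps a single running accumulator of all substring values ending at the current index (current = (current*10 + (i+1)*v) % p) and sums it.
import Mathlib
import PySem

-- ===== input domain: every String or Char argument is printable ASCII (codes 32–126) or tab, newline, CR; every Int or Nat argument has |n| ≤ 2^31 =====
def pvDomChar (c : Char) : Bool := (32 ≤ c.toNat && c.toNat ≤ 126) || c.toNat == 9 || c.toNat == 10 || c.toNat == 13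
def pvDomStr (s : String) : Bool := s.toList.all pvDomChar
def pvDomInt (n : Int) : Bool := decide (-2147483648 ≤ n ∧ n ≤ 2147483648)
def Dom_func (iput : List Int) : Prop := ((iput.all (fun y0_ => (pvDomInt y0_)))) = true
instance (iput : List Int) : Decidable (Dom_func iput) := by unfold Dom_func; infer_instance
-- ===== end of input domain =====

-- B replaces A's backward closed-form (repunit × position-weight) accumulation by a forward
-- suffix-sum DP over enumerate; objective: simpler (same O(n) cost).

-- ===== PORT A =====
-- the index (len-i-1) is in range for every i < len, so pyGetD is exact here
def funcGo (iput : List Int) (i : Nat) (mulpler sumf : Int) : Int :=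
  if _h : i < iput.length then
    let m1 := mulpler * 10 + 1
    let m2 := PySem.Int.mod m1 1000000007
    let s1 := sumf + PySem.List.pyGetD iput ((iput.length : Int) - i - 1) 0 * m2 * ((iput.length : Int) - i)
    let s2 := PySem.Int.mod s1 1000000007
    funcGo iput (i + 1) m2 s2
  else sumf
termination_by iput.length - i

def func (iput : List Int) : Int := funcGo iput 0 0 0

-- ===== PORT B =====
def funcAltStep (st : Int × Int) (p : Int × Int) : Int × Int :=
  let current := PySem.Int.mod (st.1 * 10 + (p.1 + 1) * p.2) 1000000007
  let result := PySem.Int.mod (st.2 + current) 1000000007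
  (current, result)

def func_alt (iput : List Int) : Int :=
  ((PySem.List.enumerate iput).foldl funcAltStep (0, 0)).2

-- ===== PRECONDITION & SPEC =====
def Spec_func (iput : List Int) (out : Int) : Prop := out = func_alt iput
instance (iput : List Int) (out : Int) : Decidable (Spec_func iput out) := by unfold Spec_func; infer_instance

-- ===== CLAIM (what is proved, stated in full; the proofs are below) =====
def Claim_equal_func : Prop := ∀ (iput : List Int), Dom_func iput → Spec_func iput (func iput)

-- ===== LEMMAS AND PROOFS =====

-- repunit 1…1 with m ones
def repu : Nat → Int
  | 0 => 0
  | m + 1 => 10 * repu m + 1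

-- sum A's loop accumulates (k-th iteration order)
def sumA (x : List Int) (i : Nat) : Int :=
  ∑ k ∈ Finset.range i, x.getD (x.length - 1 - k) 0 * repu (k + 1) * ((x.length : Int) - k)

-- same sum reindexed forward
def sumF (x : List Int) (n : Nat) : Int :=
  ∑ j ∈ Finset.range n, x.getD j 0 * ((j : Int) + 1) * repu (n - j)

-- mod-free value of B's `current` after i elements
def sumC (x : List Int) (i : Nat) : Int :=
  ∑ j ∈ Finset.range i, x.getD j 0 * ((j : Int) + 1) * 10 ^ (i - 1 - j)

-- mod-free value of B's `result` after n elements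
def sumG (x : List Int) (n : Nat) : Int :=
  ∑ t ∈ Finset.range n, sumC x (t + 1)

theorem pymod_eq (a : Int) : PySem.Int.mod a 1000000007 = a % 1000000007 :=
  PySem.Int.mod_eq_emod_of_pos (by norm_num)

theorem repu_succ' (m : Nat) : repu (m + 1) = repu m + 10 ^ m := by
  induction m with
  | zero => simp [repu]
  | succ m ih =>
      calc repu (m + 2) = 10 * repu (m + 1) + 1 := rfl
        _ = 10 * (repu m + 10 ^ m) + 1 := by rw [ih]
        _ = (10 * repu m + 1) + 10 ^ (m + 1) := by ring
        _ = repu (m + 1) + 10 ^ (m + 1) := rfl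

theorem modAux (a b c w : Int) :
    (a % 1000000007 + c * (b % 1000000007) * w) % 1000000007
      = (a + c * b * w) % 1000000007 := by
  have hb : b % 1000000007 = b - 1000000007 * (b / 1000000007) := Int.emod_def b 1000000007
  rw [hb]
  have h1 : a % 1000000007 + c * (b - 1000000007 * (b / 1000000007)) * w
      = (a % 1000000007 + c * b * w) + 1000000007 * (-(c * (b / 1000000007) * w)) := by ring
  rw [h1, Int.add_mul_emod_self_left, Int.emod_add_emod]

theorem sumC_succ (x : List Int) (i : Nat) :
    sumC x (i + 1) = 10 * sumC x i + x.getD i 0 * ((i : Int) + 1) := by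
  unfold sumC
  rw [Finset.sum_range_succ, Finset.mul_sum]
  simp only [Nat.add_sub_cancel, Nat.sub_self, pow_zero, mul_one]
  congr 1
  refine Finset.sum_congr rfl (fun j hj => ?_)
  have hj' : j < i := Finset.mem_range.mp hj
  have he : i - j = (i - 1 - j) + 1 := by omega
  rw [he, pow_succ]
  ring

theorem sumA_eq_sumF (x : List Int) : sumA x x.length = sumF x x.length := by
  unfold sumA sumF
  rw [← Finset.sum_range_reflect]
  refine Finset.sum_congr rfl (fun k hk => ?_)
  have hk' : k < x.length := Finset.mem_range.mp hk
  have h4 : x.length - 1 - k + 1 = x.length - k := by omega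
  have h5 : ((x.length : Int)) - ((x.length - 1 - k : Nat) : Int) = (k : Int) + 1 := by omega
  have h1 : x.length - 1 - (x.length - 1 - k) = k := by omega
  rw [h1, h4, h5]
  ring

theorem sumF_succ (x : List Int) (n : Nat) : sumF x (n + 1) = sumF x n + sumC x (n + 1) := by
  unfold sumF sumC
  have h : ∀ j ∈ Finset.range (n + 1),
      x.getD j 0 * ((j : Int) + 1) * repu (n + 1 - j)
        = x.getD j 0 * ((j : Int) + 1) * repu (n - j)
          + x.getD j 0 * ((j : Int) + 1) * 10 ^ (n + 1 - 1 - j) := by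
    intro j hj
    have hj' : j ≤ n := by have := Finset.mem_range.mp hj; omega
    have he : n + 1 - j = (n - j) + 1 := by omega
    have he2 : n + 1 - 1 - j = n - j := by omega
    rw [he, he2, repu_succ']
    ring
  rw [Finset.sum_congr rfl h, Finset.sum_add_distrib]
  congr 1
  rw [Finset.sum_range_succ, Nat.sub_self]
  simp [repu]

theorem sumF_eq_sumG (x : List Int) (n : Nat) : sumF x n = sumG x n := by
  induction n with
  | zero => simp [sumF, sumG]
  | succ n ih =>
      rw [sumF_succ, ih]
      show sumG x n + sumC x (n + 1) = sumG x (n + 1)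
      have hsucc : sumG x (n + 1) = sumG x n + sumC x (n + 1) := by
        unfold sumG; rw [Finset.sum_range_succ]
      rw [hsucc]

theorem funcGo_inv (x : List Int) :
    ∀ (d i : Nat), i + d = x.length →
      funcGo x i (repu i % 1000000007) (sumA x i % 1000000007)
        = sumA x x.length % 1000000007 := by
  intro d
  induction d with
  | zero =>
      intro i hi
      have hi' : i = x.length := by omega
      subst hi'
      rw [funcGo]
      simp only [show ¬ x.length < x.length by omega, dif_neg, not_false_iff]
  | succ d ih =>
      intro i hi
      have hlt : i < x.length := by omega
      rw [funcGo]
      simp only [dif_pos hlt]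
      have hm : PySem.Int.mod (repu i % 1000000007 * 10 + 1) 1000000007
          = repu (i + 1) % 1000000007 := by
        rw [pymod_eq]
        show _ = (10 * repu i + 1) % 1000000007
        generalize repu i = a
        omega
      have hidx : ((x.length : Int) - i - 1) = ((x.length - 1 - i : Nat) : Int) := by
        push_cast [Nat.cast_sub (by omega : i ≤ x.length - 1), Nat.cast_sub (by omega : 1 ≤ x.length)]
        ring
      have hget : PySem.List.pyGetD x ((x.length : Int) - i - 1) 0
          = x.getD (x.length - 1 - i) 0 := by
        rw [hidx, PySem.List.pyGetD_natCast]
      have hs : PySem.Int.mod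
            (sumA x i % 1000000007 +
              PySem.List.pyGetD x ((x.length : Int) - i - 1) 0 *
                (repu (i + 1) % 1000000007) * ((x.length : Int) - i)) 1000000007
          = sumA x (i + 1) % 1000000007 := by
        rw [pymod_eq, hget, modAux]
        have : sumA x (i + 1)
            = sumA x i + x.getD (x.length - 1 - i) 0 * repu (i + 1) * ((x.length : Int) - i) :=
          Finset.sum_range_succ _ i
        rw [this]
      rw [hm, hs]
      exact ih (i + 1) (by omega)

theorem altInv (x : List Int) :
    ∀ (d i : Nat), i + d = x.length →
      ((PySem.List.enumerate (x.drop i) (i : Int)).foldl funcAltStep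
          (sumC x i % 1000000007, sumG x i % 1000000007)).2
        = sumG x x.length % 1000000007 := by
  intro d
  induction d with
  | zero =>
      intro i hi
      have hi' : i = x.length := by omega
      subst hi'
      rw [List.drop_of_length_le le_rfl]
      simp [PySem.List.enumerate_nil]
  | succ d ih =>
      intro i hi
      have hlt : i < x.length := by omega
      rw [List.drop_eq_getElem_cons hlt, PySem.List.enumerate_cons, List.foldl_cons]
      have hstep : funcAltStep (sumC x i % 1000000007, sumG x i % 1000000007) ((i : Int), x[i])
          = (sumC x (i + 1) % 1000000007, sumG x (i + 1) % 1000000007) := by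
        unfold funcAltStep
        simp only [pymod_eq]
        have hc : (sumC x i % 1000000007 * 10 + ((i : Int) + 1) * x[i]) % 1000000007
            = sumC x (i + 1) % 1000000007 := by
          rw [sumC_succ, List.getD_eq_getElem x 0 hlt]
          generalize sumC x i = a
          generalize hb : ((i : Int) + 1) * x[i] = b
          have : x[i] * ((i : Int) + 1) = b := by rw [← hb]; ring
          rw [this]
          omega
        have hg : (sumG x i % 1000000007 + sumC x (i + 1) % 1000000007) % 1000000007
            = sumG x (i + 1) % 1000000007 := by
          have hsucc : sumG x (i + 1) = sumG x i + sumC x (i + 1) := by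
            unfold sumG; rw [Finset.sum_range_succ]
          rw [hsucc]
          generalize sumG x i = a
          generalize sumC x (i + 1) = b
          omega
        rw [hc, hg]
      rw [hstep]
      have hcast : (i : Int) + 1 = ((i + 1 : Nat) : Int) := by push_cast; ring
      rw [hcast]
      exact ih (i + 1) (by omega)

-- ===== VERDICT (by name: the statement is the Claim_ definition above) =====
theorem func_spec : Claim_equal_func := by
  intro iput _
  unfold Spec_func func func_alt
  have hA := funcGo_inv iput iput.length 0 (by omega)
  have hB := altInv iput iput.length 0 (by omega)
  simp only [Nat.cast_zero, List.drop_zero] at hA hB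
  have h0 : repu 0 % 1000000007 = 0 := by simp [repu]
  have hA0 : sumA iput 0 % 1000000007 = 0 := by simp [sumA]
  have hC0 : sumC iput 0 % 1000000007 = 0 := by simp [sumC]
  have hG0 : sumG iput 0 % 1000000007 = 0 := by simp [sumG]
  rw [h0, hA0] at hA
  rw [hC0, hG0] at hB
  rw [hA, hB, sumA_eq_sumF, sumF_eq_sumG]
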